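-- pv_equiv track=rewrite | github.com/s2018952/Advent-of-Code | 2023/12-12-2023/solution2.py | generatePossibleStrings
-- ===== SOURCE A (Python) =====
-- def getGroup(string):
--     nums = []
--     consec = 0
--     for i in range(len(string)):
--         if string[i] == '#':
--             consec += 1
--         else:
--             if consec != 0:
--                 nums.append(consec)
--                 consec = 0
--     if consec != 0:
--         nums.append(consec)
--     return nums
--
-- def isGroupConsistent(group_to_check,group):
--     if len(group_to_check) > len(group):
--         return False
--     else:
--         for i in range(len(group_to_check)):
--             if i < len(group_to_check) - 1 and group_to_check[i] != group[i]:
--                 return False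
--             elif i == len(group_to_check) - 1 and group_to_check[i] > group[i]:
--                 return False
--     return True
--
-- def generatePossibleStrings(strings,ch,group):
--     possibles = []
--     for string in strings:
--         if ch == '.' or ch == '#':
--             s = string + ch
--             g = getGroup(s)
--             if isGroupConsistent(g,group):
--                 possibles.append(s)
--         else:
--             s1 = string + '.'
--             s2 = string + '#'
--             g1 = getGroup(s1)
--             g2 = getGroup(s2)
--             if isGroupConsistent(g1,group):
--                 possibles.append(s1)
--             if isGroupConsistent(g2,group):
--                 possibles.append(s2)
--     if len(strings) == 0 and ch != '?':
--         s = "" + ch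
--         if isGroupConsistent(getGroup(s),group):
--             possibles.append(s)
--     elif len(strings) == 0 and ch == '?':
--         s1 = "."
--         s2 = "#"
--         if isGroupConsistent(getGroup(s1),group):
--             possibles.append(s1)
--         if isGroupConsistent(getGroup(s2),group):
--             possibles.append(s2)
--     return possibles
-- ===== SOURCE B (Python) =====
-- def _fits(s, group):
--     # one streaming pass: compare the '#'-runs of s against group on the fly,
--     # deferring each closed run by one so the final run is checked with <=.
--     idx = 0
--     consec = 0
--     pending = None
--     for c in s:
--         if c == '#':
--             consec += 1
--         elif consec:
--             if pending is not None:
--                 if idx >= len(group) or group[idx] != pending: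
--                     return False
--                 idx += 1
--             pending = consec
--             consec = 0
--     if consec:
--         if pending is not None:
--             if idx >= len(group) or group[idx] != pending:
--                 return False
--             idx += 1
--         pending = consec
--     if pending is not None:
--         return idx < len(group) and pending <= group[idx]
--     return True
--
-- def generatePossibleStrings(strings, ch, group):
--     if ch == '.' or ch == '#' or (not strings and ch != '?'):
--         suffixes = [ch]
--     else:
--         suffixes = ['.', '#']
--     bases = strings if strings else [""]
--     return [b + suf for b in bases for suf in suffixes if _fits(b + suf, group)]
-- ===== Notes on version B (the rewrite author's own statement) =====
-- stated objective: faster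
-- what changed: Per candidate string, A builds the full '#'-run list with getGroup and then runs a separate index loop (isGroupConsistent); B does one streaming pass over the string that compares each closed run against group on the fly with early exit and no intermediate list, and unifies A's four branching cases into a single bases-x-suffixes comprehension.
import Mathlib
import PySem

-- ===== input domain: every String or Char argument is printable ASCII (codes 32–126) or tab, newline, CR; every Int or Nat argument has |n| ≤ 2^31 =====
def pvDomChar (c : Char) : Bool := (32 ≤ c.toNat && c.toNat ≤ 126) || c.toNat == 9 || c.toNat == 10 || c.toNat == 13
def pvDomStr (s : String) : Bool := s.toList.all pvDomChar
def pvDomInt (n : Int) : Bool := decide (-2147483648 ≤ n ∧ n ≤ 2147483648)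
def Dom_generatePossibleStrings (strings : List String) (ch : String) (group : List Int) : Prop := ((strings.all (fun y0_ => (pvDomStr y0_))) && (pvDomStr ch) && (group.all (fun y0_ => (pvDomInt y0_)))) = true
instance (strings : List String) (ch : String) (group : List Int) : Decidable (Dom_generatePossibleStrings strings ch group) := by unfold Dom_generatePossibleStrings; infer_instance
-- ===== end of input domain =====

-- B replaces A's rescan-the-whole-string getGroup + separate consistency loop by a single
-- streaming pass per candidate with early exit (objective: alternative/simpler check).

-- ===== PORT A =====
-- getGroup: fold over the characters carrying (nums, consec), then flush the open run
def pvGGStep (p : List Int × Int) (c : Char) : List Int × Int :=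
  if c = '#' then (p.1, p.2 + 1)
  else if p.2 ≠ 0 then (p.1 ++ [p.2], 0) else p

def pvGGFin (st : List Int × Int) : List Int :=
  if st.2 ≠ 0 then st.1 ++ [st.2] else st.1

def pvGetGroup (s : List Char) : List Int := pvGGFin (s.foldl pvGGStep ([], 0))

-- isGroupConsistent's index loop
def pvIsGCLoop (g group : List Int) (i : Nat) : Bool :=
  if i < g.length then
    if i < g.length - 1 ∧ g.getD i 0 ≠ group.getD i 0 then false
    else if i = g.length - 1 ∧ g.getD i 0 > group.getD i 0 then false
    else pvIsGCLoop g group (i + 1)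
  else true
termination_by g.length - i

def pvIsGC (g group : List Int) : Bool :=
  if g.length > group.length then false else pvIsGCLoop g group 0

def generatePossibleStrings (strings : List String) (ch : String) (group : List Int) : List String :=
  let possibles := strings.foldl (fun acc string =>
    if ch.toList = ['.'] ∨ ch.toList = ['#'] then
      let s := string.toList ++ ch.toList
      if pvIsGC (pvGetGroup s) group then acc ++ [String.ofList s] else acc
    else
      let s1 := string.toList ++ ['.']
      let s2 := string.toList ++ ['#']
      let acc1 := if pvIsGC (pvGetGroup s1) group then acc ++ [String.ofList s1] else acc
      if pvIsGC (pvGetGroup s2) group then acc1 ++ [String.ofList s2] else acc1) []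
  if strings.length = 0 ∧ ch.toList ≠ ['?'] then
    let s := ch.toList
    if pvIsGC (pvGetGroup s) group then possibles ++ [String.ofList s] else possibles
  else if strings.length = 0 ∧ ch.toList = ['?'] then
    let acc1 := if pvIsGC (pvGetGroup ['.']) group then possibles ++ [String.ofList ['.']] else possibles
    if pvIsGC (pvGetGroup ['#']) group then acc1 ++ [String.ofList ['#']] else acc1
  else possibles

-- ===== PORT B =====
-- end-of-loop tail of _fits (the code after the for loop)
def pvFitsEnd (group : List Int) (idx : Nat) (consec : Int) (pending : Option Int) : Bool :=
  if consec ≠ 0 then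
    match pending with
    | some p =>
        if idx ≥ group.length ∨ group.getD idx 0 ≠ p then false
        else decide (idx + 1 < group.length) && decide (consec ≤ group.getD (idx + 1) 0)
    | none => decide (idx < group.length) && decide (consec ≤ group.getD idx 0)
  else
    match pending with
    | some p => decide (idx < group.length) && decide (p ≤ group.getD idx 0)
    | none => true

-- the for loop of _fits, with early return false
def pvFitsLoop (group : List Int) : List Char → Nat → Int → Option Int → Bool
  | [], idx, consec, pending => pvFitsEnd group idx consec pending
  | c :: rest, idx, consec, pending =>
    if c = '#' then pvFitsLoop group rest idx (consec + 1) pending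
    else if consec ≠ 0 then
      match pending with
      | some p =>
          if idx ≥ group.length ∨ group.getD idx 0 ≠ p then false
          else pvFitsLoop group rest (idx + 1) 0 (some consec)
      | none => pvFitsLoop group rest idx 0 (some consec)
    else pvFitsLoop group rest idx consec pending

def pvFits (s : List Char) (group : List Int) : Bool := pvFitsLoop group s 0 0 none

def generatePossibleStrings_alt (strings : List String) (ch : String) (group : List Int) : List String :=
  let suffixes : List (List Char) :=
    if ch.toList = ['.'] ∨ ch.toList = ['#'] ∨ (strings = [] ∧ ch.toList ≠ ['?']) then [ch.toList]
    else [['.'], ['#']]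
  let bases : List String := if strings = [] then [""] else strings
  bases.flatMap (fun b => suffixes.filterMap (fun suf =>
    let s := b.toList ++ suf
    if pvFits s group then some (String.ofList s) else none))

-- ===== PRECONDITION & SPEC =====
def Spec_generatePossibleStrings (strings : List String) (ch : String) (group : List Int) (out : List String) : Prop := out = generatePossibleStrings_alt strings ch group
instance (strings : List String) (ch : String) (group : List Int) (out : List String) : Decidable (Spec_generatePossibleStrings strings ch group out) := by unfold Spec_generatePossibleStrings; infer_instance

-- ===== CLAIM (what is proved, stated in full; the proofs are below) =====
def Claim_equal_generatePossibleStrings : Prop := ∀ (strings : List String) (ch : String) (group : List Int), Dom_generatePossibleStrings strings ch group → Spec_generatePossibleStrings strings ch group (generatePossibleStrings strings ch group)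

-- ===== LEMMAS AND PROOFS =====

-- reference check: elementwise equality on all but the last run, ≤ on the last
def pvCheck : List Int → List Int → Bool
  | [], _ => true
  | [a], [] => false
  | [a], b :: _ => decide (a ≤ b)
  | _ :: _ :: _, [] => false
  | a :: as@(_ :: _), b :: bs => decide (a = b) && pvCheck as bs

-- getGroup continued from an open run of length c
def pvGGCont (c : Int) (s : List Char) : List Int := pvGGFin (s.foldl pvGGStep ([], c))

theorem pvGG_append (s : List Char) : ∀ (nums : List Int) (c : Int),
    pvGGFin (s.foldl pvGGStep (nums, c)) = nums ++ pvGGCont c s := by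
  induction s with
  | nil =>
    intro nums c
    simp only [pvGGCont, List.foldl_nil, pvGGFin]
    split <;> simp
  | cons x rest ih =>
    intro nums c
    by_cases hx : x = '#'
    · simp only [List.foldl_cons]
      rw [show pvGGStep (nums, c) x = (nums, c + 1) from by simp [pvGGStep, hx], ih]
      congr 1
      simp only [pvGGCont, List.foldl_cons]
      rw [show pvGGStep (([] : List Int), c) x = ([], c + 1) from by simp [pvGGStep, hx]]
    · by_cases hc : c ≠ 0
      · simp only [List.foldl_cons]
        rw [show pvGGStep (nums, c) x = (nums ++ [c], 0) from by simp [pvGGStep, hx, hc], ih]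
        have hR : pvGGCont c (x :: rest) = [c] ++ pvGGCont 0 rest := by
          simp only [pvGGCont, List.foldl_cons]
          rw [show pvGGStep (([] : List Int), c) x = ([c], 0) from by simp [pvGGStep, hx, hc]]
          simpa using ih [c] 0
        rw [hR, List.append_assoc]
      · simp only [List.foldl_cons]
        rw [show pvGGStep (nums, c) x = (nums, c) from by simp [pvGGStep, hx, hc], ih]
        congr 1
        simp only [pvGGCont, List.foldl_cons]
        rw [show pvGGStep (([] : List Int), c) x = ([], c) from by simp [pvGGStep, hx, hc]]

theorem pvGGCont_hash (c : Int) (rest : List Char) :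
    pvGGCont c ('#' :: rest) = pvGGCont (c + 1) rest := by
  simp only [pvGGCont, List.foldl_cons]
  rw [show pvGGStep (([] : List Int), c) '#' = ([], c + 1) from by simp [pvGGStep]]

theorem pvGGCont_close (x : Char) (hx : x ≠ '#') (c : Int) (hc : c ≠ 0) (rest : List Char) :
    pvGGCont c (x :: rest) = c :: pvGGCont 0 rest := by
  simp only [pvGGCont, List.foldl_cons]
  rw [show pvGGStep (([] : List Int), c) x = ([c], 0) from by simp [pvGGStep, hx, hc]]
  simpa using pvGG_append rest [c] 0

theorem pvGGCont_skip (x : Char) (hx : x ≠ '#') (rest : List Char) :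
    pvGGCont 0 (x :: rest) = pvGGCont 0 rest := by
  simp only [pvGGCont, List.foldl_cons]
  rw [show pvGGStep (([] : List Int), 0) x = ([], 0) from by simp [pvGGStep, hx]]

theorem pvGetGroup_eq_cont (s : List Char) : pvGetGroup s = pvGGCont 0 s := rfl

-- the streaming loop computes pvCheck of (pending runs ++ remaining runs) against group.drop idx
theorem pvFitsLoop_eq (group : List Int) (s : List Char) : ∀ (idx : Nat) (consec : Int) (pending : Option Int),
    pvFitsLoop group s idx consec pending
      = pvCheck (pending.toList ++ pvGGCont consec s) (group.drop idx) := by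
  induction s with
  | nil =>
    intro idx consec pending
    have hgd : ∀ j : Nat, (group.drop j).getD 0 0 = group.getD j 0 := by
      intro j; simp [List.getD, List.getElem?_drop]
    have hlen : ∀ j : Nat, (group.drop j = []) ↔ group.length ≤ j := by
      intro j; simp [List.drop_eq_nil_iff]
    simp only [pvFitsLoop, pvFitsEnd, pvGGCont, List.foldl_nil]
    by_cases hc : consec ≠ 0
    · cases pending with
      | none =>
        simp only [hc, if_true, Option.toList]
        cases hdrop : group.drop idx with
        | nil =>
          have : group.length ≤ idx := (hlen idx).1 hdrop
          simp [pvCheck, pvGGFin, hc]; omega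
        | cons b bs =>
          have hidx : idx < group.length := by
            by_contra h
            rw [(hlen idx).2 (by omega)] at hdrop; simp at hdrop
          have hb : b = group.getD idx 0 := by
            have h := hgd idx; rw [hdrop] at h
            rw [← h]; rfl
          simp [pvCheck, pvGGFin, hc, hb, hidx]
      | some p =>
        simp only [hc, if_true, Option.toList]
        cases hdrop : group.drop idx with
        | nil =>
          have : group.length ≤ idx := (hlen idx).1 hdrop
          simp [pvCheck, pvGGFin, hc]; omega
        | cons b bs =>
          have hidx : idx < group.length := by
            by_contra h
            rw [(hlen idx).2 (by omega)] at hdrop; simp at hdrop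
          have hb : b = group.getD idx 0 := by
            have h := hgd idx; rw [hdrop] at h
            rw [← h]; rfl
          have hbs : bs = group.drop (idx + 1) := by
            have : group.drop (idx + 1) = (group.drop idx).drop 1 := by
              simp [List.drop_drop]
            rw [this, hdrop]; simp
          by_cases hp : group.getD idx 0 = p
          · cases hbs2 : group.drop (idx + 1) with
            | nil =>
              have h2 : group.length ≤ idx + 1 := (hlen (idx + 1)).1 hbs2
              simp [pvCheck, pvGGFin, hc, hidx, hp, hb, hbs, hbs2]
              omega
            | cons b2 bs2 =>
              have hidx2 : idx + 1 < group.length := by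
                by_contra h
                rw [(hlen (idx + 1)).2 (by omega)] at hbs2; simp at hbs2
              have hb2 : b2 = group.getD (idx + 1) 0 := by
                have h := hgd (idx + 1); rw [hbs2] at h
                rw [← h]; rfl
              simp [pvCheck, pvGGFin, hc, hidx, hp, hb, hbs, hbs2, hb2, hidx2,
                show ¬ group.length ≤ idx by omega, eq_comm]
          · simp [pvCheck, pvGGFin, hc, hb, show ¬ group.length ≤ idx by omega, eq_comm]
            simp [show ¬ (p = group[idx]?.getD 0) from fun h => hp h.symm]
    · cases pending with
      | none => simp [pvCheck, pvGGFin, hc]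
      | some p =>
        simp only [hc, if_false, Option.toList, ite_false]
        cases hdrop : group.drop idx with
        | nil =>
          have : group.length ≤ idx := (hlen idx).1 hdrop
          simp [pvCheck, pvGGFin, hc]; omega
        | cons b bs =>
          have hidx : idx < group.length := by
            by_contra h
            rw [(hlen idx).2 (by omega)] at hdrop; simp at hdrop
          have hb : b = group.getD idx 0 := by
            have h := hgd idx; rw [hdrop] at h
            rw [← h]; rfl
          simp [pvCheck, pvGGFin, hc, hb, hidx]
  | cons x rest ih =>
    intro idx consec pending
    by_cases hx : x = '#'
    · simp only [pvFitsLoop, hx, ih, pvGGCont_hash]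
      simp
    · by_cases hc : consec ≠ 0
      · cases pending with
        | none =>
          simp only [pvFitsLoop, if_neg hx, hc, if_true, ih, pvGGCont_close x hx consec hc]
          simp [hc]
        | some p =>
          simp only [pvFitsLoop, if_neg hx, hc, if_true]
          rw [pvGGCont_close x hx consec hc]
          have hgd : (group.drop idx).getD 0 0 = group.getD idx 0 := by
            simp [List.getD, List.getElem?_drop]
          cases hdrop : group.drop idx with
          | nil =>
            have hidx : group.length ≤ idx := by
              by_contra h
              have : group.drop idx ≠ [] := by
                simp [List.drop_eq_nil_iff]; omega
              exact this hdrop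
            have : idx ≥ group.length := hidx
            simp [this, pvCheck]
            intro h
            exact absurd h hc
          | cons b bs =>
            have hidx : idx < group.length := by
              by_contra h
              have : group.drop idx = [] := by simp [List.drop_eq_nil_iff]; omega
              rw [this] at hdrop; simp at hdrop
            have hb : b = group.getD idx 0 := by
              rw [hdrop] at hgd
              rw [← hgd]; rfl
            have hbs : bs = group.drop (idx + 1) := by
              have : group.drop (idx + 1) = (group.drop idx).drop 1 := by
                simp [List.drop_drop]
              rw [this, hdrop]; simp
            by_cases hp : group.getD idx 0 = p
            · have hcond : ¬ (idx ≥ group.length ∨ group.getD idx 0 ≠ p) := by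
                simp only [not_or, not_not, ge_iff_le, not_le]
                exact ⟨hidx, hp⟩
              rw [if_neg hcond, ih, hbs]
              simp [pvCheck, hc, hp.symm, hb, List.getD]
            · have hcond : (idx ≥ group.length ∨ group.getD idx 0 ≠ p) := Or.inr hp
              rw [if_pos hcond]
              simp [pvCheck, show ¬ (p = b) from fun h => hp (by rw [hb] at h; exact h.symm)]
              intro h
              exact absurd h hc
      · have h0 : consec = 0 := by simpa using hc
        subst h0
        simp only [pvFitsLoop, if_neg hx, ih, pvGGCont_skip x hx]
        simp

-- A's consistency check equals pvCheck
theorem pvCheck_long_false : ∀ (g group : List Int), group.length < g.length → pvCheck g group = false := by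
  intro g
  induction g with
  | nil => intro group h; simp at h
  | cons a as ih =>
    intro group h
    cases as with
    | nil =>
      cases group with
      | nil => rfl
      | cons b bs => simp at h
    | cons a2 as2 =>
      cases group with
      | nil => rfl
      | cons b bs =>
        simp only [pvCheck]
        have : pvCheck (a2 :: as2) bs = false := ih bs (by simp at h ⊢; omega)
        simp [this]
  termination_by g => g.length

theorem pvIsGCLoop_eq (g group : List Int) (hlen : g.length ≤ group.length) :
    ∀ i, pvIsGCLoop g group i = pvCheck (g.drop i) (group.drop i) := by
  intro i
  induction hn : g.length - i using Nat.strong_induction_on generalizing i with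
  | _ n ihn =>
  rw [pvIsGCLoop]
  by_cases hi : i < g.length
  · have hig : i < group.length := by omega
    have hgd : g.getD i 0 = g[i] := by simp [List.getD, List.getElem?_eq_getElem hi]
    have hgrd : group.getD i 0 = group[i] := by simp [List.getD, List.getElem?_eq_getElem hig]
    have hgdrop : g.drop i = g[i] :: g.drop (i + 1) := List.drop_eq_getElem_cons hi
    have hgrdrop : group.drop i = group[i] :: group.drop (i + 1) := List.drop_eq_getElem_cons hig
    rw [if_pos hi, hgd, hgrd, hgdrop, hgrdrop]
    by_cases hlast : i = g.length - 1
    · have hdrop1 : g.drop (i + 1) = [] := by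
        rw [List.drop_eq_nil_iff]; omega
      rw [hdrop1]
      by_cases hgt : g[i] > group[i]
      · rw [if_neg (by rintro ⟨h1, -⟩; omega), if_pos ⟨hlast, hgt⟩]
        simp only [pvCheck]
        simp
        omega
      · rw [if_neg (by rintro ⟨h1, -⟩; omega), if_neg (fun h => hgt h.2)]
        rw [pvIsGCLoop, if_neg (by omega : ¬ (i + 1 < g.length))]
        simp only [pvCheck]
        simp
        omega
    · have hi1 : i < g.length - 1 := by omega
      obtain ⟨y, ys, hd⟩ : ∃ y ys, g.drop (i + 1) = y :: ys := by
        cases hdd : g.drop (i + 1) with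
        | nil => exfalso; rw [List.drop_eq_nil_iff] at hdd; omega
        | cons y ys => exact ⟨y, ys, rfl⟩
      rw [hd]
      simp only [pvCheck]
      by_cases heq : g[i] = group[i]
      · have hrec := ihn (g.length - (i + 1)) (by omega) (i + 1) rfl
        rw [hd] at hrec
        rw [if_neg (by rintro ⟨-, hne⟩; exact hne heq),
          if_neg (by rintro ⟨h1, -⟩; omega), hrec]
        simp [heq]
      · rw [if_pos ⟨hi1, heq⟩]
        simp [heq]
  · have hd : g.drop i = [] := by rw [List.drop_eq_nil_iff]; omega
    simp [hi, hd, pvCheck]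

theorem pvIsGC_eq_check (g group : List Int) : pvIsGC g group = pvCheck g group := by
  unfold pvIsGC
  by_cases h : g.length > group.length
  · rw [if_pos h, (pvCheck_long_false g group h).symm]
  · rw [if_neg h]
    simpa using pvIsGCLoop_eq g group (by omega) 0

theorem pvFits_eq (s : List Char) (group : List Int) :
    pvFits s group = pvIsGC (pvGetGroup s) group := by
  rw [pvFits, pvFitsLoop_eq, pvIsGC_eq_check, pvGetGroup_eq_cont]
  simp

-- loop shape: A's conditional-append fold is init ++ flatMap of the per-string contribution
theorem pvFoldl_shape {α : Type} (l : List α) (body : List String → α → List String)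
    (contrib : α → List String) (h : ∀ acc x, body acc x = acc ++ contrib x) (init : List String) :
    l.foldl body init = init ++ l.flatMap contrib := by
  have : body = fun acc x => acc ++ contrib x := by
    funext acc x; exact h acc x
  rw [this, PySem.List.foldl_append_eq_flatMap]

-- ===== VERDICT (by name: the statement is the Claim_ definition above) =====
theorem generatePossibleStrings_spec : Claim_equal_generatePossibleStrings := by
  intro strings ch group _
  unfold Spec_generatePossibleStrings generatePossibleStrings generatePossibleStrings_alt
  cases strings with
  | nil =>
    simp only [List.foldl_nil]
    by_cases hq : ch.toList = ['?']
    · rw [if_neg (by simp [hq]),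
        if_pos (show (([] : List String).length = 0 ∧ ch.toList = ['?']) by simp [hq]),
        ]
      by_cases c1 : pvIsGC (pvGetGroup ['.']) group <;>
        by_cases c2 : pvIsGC (pvGetGroup ['#']) group <;>
        simp [hq, pvFits_eq, c1, c2, show "".toList = [] from rfl]
    · rw [if_pos (show (([] : List String).length = 0 ∧ ch.toList ≠ ['?']) by simp [hq]),
        ]
      by_cases c : pvIsGC (pvGetGroup ch.toList) group <;>
        simp [hq, pvFits_eq, c, show "".toList = [] from rfl]
  | cons s0 ss =>
    rw [if_neg (show ¬ ((s0 :: ss) = []) by simp)]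
    rw [if_neg (show ¬ ((s0 :: ss).length = 0 ∧ ch.toList ≠ ['?']) by simp),
      if_neg (show ¬ ((s0 :: ss).length = 0 ∧ ch.toList = ['?']) by simp)]
    by_cases hch : ch.toList = ['.'] ∨ ch.toList = ['#']
    · rw [if_pos (show (ch.toList = ['.'] ∨ ch.toList = ['#'] ∨ ((s0 :: ss) = [] ∧ ch.toList ≠ ['?'])) by
        rcases hch with h | h
        · exact Or.inl h
        · exact Or.inr (Or.inl h))]
      rw [pvFoldl_shape (s0 :: ss) _
        (fun string => if pvIsGC (pvGetGroup (String.toList string ++ ch.toList)) group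
          then [String.ofList (String.toList string ++ ch.toList)] else [])
        (by
          intro acc x
          dsimp only
          rw [if_pos hch]
          split <;> simp)]
      simp only [List.nil_append]
      congr 1
      funext b
      by_cases c : pvIsGC (pvGetGroup (b.toList ++ ch.toList)) group <;>
        simp [pvFits_eq, c]
    · rw [if_neg (show ¬ (ch.toList = ['.'] ∨ ch.toList = ['#'] ∨ ((s0 :: ss) = [] ∧ ch.toList ≠ ['?'])) by
        rintro (h | h | ⟨h, -⟩)
        · exact hch (Or.inl h)
        · exact hch (Or.inr h)
        · exact absurd h (by simp))]
      rw [pvFoldl_shape (s0 :: ss) _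
        (fun string =>
          (if pvIsGC (pvGetGroup (String.toList string ++ ['.'])) group then [String.ofList (String.toList string ++ ['.'])] else [])
          ++ (if pvIsGC (pvGetGroup (String.toList string ++ ['#'])) group then [String.ofList (String.toList string ++ ['#'])] else []))
        (by
          intro acc x
          dsimp only
          rw [if_neg hch]
          split <;> split <;> simp)]
      simp only [List.nil_append]
      congr 1
      funext b
      by_cases c1 : pvIsGC (pvGetGroup (b.toList ++ ['.'])) group <;>
        by_cases c2 : pvIsGC (pvGetGroup (b.toList ++ ['#'])) group <;>
        simp [pvFits_eq, c1, c2]
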